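-- pv_equiv track=rewrite | github.com/YohansHailu/competitive_programming | binarysearch/countNegativesinsortedarray.py | bs_frist_neg
-- ===== SOURCE A (Python) =====
-- def bs_frist_neg(arr,right):
--     # the array is dicreasing
--     if right >= len(arr):
--         return -1
--
--     ans = -1
--
--     left = 0
--
--     while left <= right:
--         mid = left + (right - left)//2
--
--         if arr[mid] < 0:
--             ans = mid
--             right = mid-1
--         else:
--             left = mid+1
--
--     return ans
-- ===== SOURCE B (Python) =====
-- def _final_left(arr, lo, hi):
--     # returns the value of `left` when a plain binary search over [lo, hi]
--     # (no accumulator) terminates; no answer index is tracked at all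
--     if lo > hi:
--         return lo
--     mid = (lo + hi) // 2
--     if arr[mid] < 0:
--         return _final_left(arr, lo, mid - 1)
--     return _final_left(arr, mid + 1, hi)
--
--
-- def bs_frist_neg(arr, right):
--     if right >= len(arr):
--         return -1
--     pos = _final_left(arr, 0, right)
--     return pos if pos <= right else -1
-- ===== Notes on version B (the rewrite author's own statement) =====
-- stated objective: alternative
-- what changed: Drops the ans accumulator entirely: B runs an accumulator-free recursive binary search that only computes the loop's final left boundary, then derives the answer from that boundary (final left if it is <= the original right, else -1).
import Mathlib
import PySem

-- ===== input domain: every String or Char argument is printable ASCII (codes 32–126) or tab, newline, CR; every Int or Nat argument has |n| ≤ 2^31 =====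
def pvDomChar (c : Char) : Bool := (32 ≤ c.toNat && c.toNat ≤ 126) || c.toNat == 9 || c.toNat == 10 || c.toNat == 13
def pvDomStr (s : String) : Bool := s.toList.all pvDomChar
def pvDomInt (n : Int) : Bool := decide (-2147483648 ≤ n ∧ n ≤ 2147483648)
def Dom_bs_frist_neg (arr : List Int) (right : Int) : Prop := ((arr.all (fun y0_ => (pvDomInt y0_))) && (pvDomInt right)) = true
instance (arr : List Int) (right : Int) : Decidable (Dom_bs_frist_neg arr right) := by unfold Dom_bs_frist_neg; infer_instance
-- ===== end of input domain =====

-- B removes A's `ans` accumulator: it runs an accumulator-free binary search computing only the final left boundary and derives the answer from it.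

-- ===== PORT A =====
-- the while-loop of A: state (left, right, ans); branches and updates in A's order
def bsLoopA (arr : List Int) (left right ans : Int) : Int :=
  if _h : left ≤ right then
    let mid := left + PySem.Int.floordiv (right - left) 2
    if (PySem.List.pyGet? arr mid).getD 0 < 0 then
      bsLoopA arr left (mid - 1) mid
    else
      bsLoopA arr (mid + 1) right ans
  else ans
termination_by (right - left + 1).toNat
decreasing_by
  all_goals
    have hd : PySem.Int.floordiv (right - left) 2 = (right - left) / 2 :=
      PySem.Int.floordiv_eq_ediv_of_pos (by omega)
    simp only [hd]
    omega

def bs_frist_neg (arr : List Int) (right : Int) : Int :=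
  if right ≥ (arr.length : Int) then -1
  else bsLoopA arr 0 right (-1)

-- ===== PORT B =====
-- B's helper `_final_left`: the terminating value of the left boundary, no answer tracked
def finalLeft (arr : List Int) (lo hi : Int) : Int :=
  if _h : lo > hi then lo
  else
    let mid := PySem.Int.floordiv (lo + hi) 2
    if (PySem.List.pyGet? arr mid).getD 0 < 0 then
      finalLeft arr lo (mid - 1)
    else
      finalLeft arr (mid + 1) hi
termination_by (hi - lo + 1).toNat
decreasing_by
  all_goals
    have hb := PySem.Int.floordiv_two_mid_bounds (lo := lo) (hi := hi) (by omega)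
    omega

def bs_frist_neg_alt (arr : List Int) (right : Int) : Int :=
  if right ≥ (arr.length : Int) then -1
  else
    let pos := finalLeft arr 0 right
    if pos ≤ right then pos else -1

-- ===== PRECONDITION & SPEC =====
def Spec_bs_frist_neg (arr : List Int) (right : Int) (out : Int) : Prop := out = bs_frist_neg_alt arr right
instance (arr : List Int) (right : Int) (out : Int) : Decidable (Spec_bs_frist_neg arr right out) := by unfold Spec_bs_frist_neg; infer_instance

-- ===== CLAIM (what is proved, stated in full; the proofs are below) =====
def Claim_equal_bs_frist_neg : Prop := ∀ (arr : List Int) (right : Int), Dom_bs_frist_neg arr right → Spec_bs_frist_neg arr right (bs_frist_neg arr right)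

-- ===== LEMMAS AND PROOFS =====

-- A's midpoint expression equals B's: left + (right-left)//2 = (left+right)//2
lemma mid_eq (left right : Int) (_h : left ≤ right) :
    left + PySem.Int.floordiv (right - left) 2 = PySem.Int.floordiv (left + right) 2 := by
  rw [PySem.Int.floordiv_eq_ediv_of_pos (by omega : (0:Int) < 2),
      PySem.Int.floordiv_eq_ediv_of_pos (by omega : (0:Int) < 2)]
  omega

-- bounds of the final left boundary
lemma finalLeft_bounds (arr : List Int) (lo hi : Int) (h : lo ≤ hi + 1) :
    lo ≤ finalLeft arr lo hi ∧ finalLeft arr lo hi ≤ hi + 1 := by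
  fun_induction finalLeft arr lo hi with
  | case1 lo hi hgt => omega
  | case2 lo hi hle mid hneg ih =>
    have hb := PySem.Int.floordiv_two_mid_bounds (lo := lo) (hi := hi) (by omega)
    have := ih (by omega)
    omega
  | case3 lo hi hle mid hneg ih =>
    have hb := PySem.Int.floordiv_two_mid_bounds (lo := lo) (hi := hi) (by omega)
    have := ih (by omega)
    omega

-- loop invariant: A's loop equals "final left if it stayed in range, else the accumulator"
lemma loopA_eq_finalLeft (arr : List Int) (left right ans : Int) :
    bsLoopA arr left right ans =
      if finalLeft arr left right ≤ right then finalLeft arr left right else ans := by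
  fun_induction bsLoopA arr left right ans with
  | case1 left right ans hle mid hneg ih =>
    have hmid : PySem.Int.floordiv (left + right) 2 = mid := (mid_eq left right hle).symm
    have hb := PySem.Int.floordiv_two_mid_bounds (lo := left) (hi := right) (by omega)
    rw [finalLeft, dif_neg (by omega : ¬ left > right), hmid, if_pos hneg,
        ih]
    have hbnd := finalLeft_bounds arr left (mid - 1) (by omega)
    split_ifs <;> omega
  | case2 left right ans hle mid hneg ih =>
    have hmid : PySem.Int.floordiv (left + right) 2 = mid := (mid_eq left right hle).symm
    have hb := PySem.Int.floordiv_two_mid_bounds (lo := left) (hi := right) (by omega)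
    rw [finalLeft, dif_neg (by omega : ¬ left > right), hmid, if_neg hneg,
        ih]
  | case3 left right ans hgt =>
    rw [finalLeft, dif_pos (by omega : left > right)]
    rw [if_neg (by omega)]

-- ===== VERDICT (by name: the statement is the Claim_ definition above) =====
theorem bs_frist_neg_spec : Claim_equal_bs_frist_neg := by
  intro arr right _
  unfold Spec_bs_frist_neg bs_frist_neg bs_frist_neg_alt
  split
  · rfl
  · rw [loopA_eq_finalLeft arr 0 right (-1)]
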